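-- pv_equiv track=rewrite | github.com/tgparkk/RoboTrader | simulate_realistic.py | apply_capital_limit
-- ===== SOURCE A (Python) =====
-- from collections import defaultdict
--
-- MAX_POSITIONS = 5
--
-- def apply_capital_limit(results):
--     daily = defaultdict(list)
--     for r in results:
--         daily[r['date']].append(r)
--
--     limited = []
--     for d in sorted(daily.keys()):
--         s = sorted(daily[d], key=lambda x: x['t'])[:MAX_POSITIONS]
--         limited.extend(s)
--     return limited
-- ===== SOURCE B (Python) =====
-- MAX_POSITIONS = 5
--
-- def apply_capital_limit(results):
--     # One global stable sort by (date, t), then a single counting pass.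
--     counts = {}
--     limited = []
--     for r in sorted(results, key=lambda x: (x['date'], x['t'])):
--         c = counts.get(r['date'], 0)
--         if c < MAX_POSITIONS:
--             limited.append(r)
--             counts[r['date']] = c + 1
--     return limited
-- ===== Notes on version B (the rewrite author's own statement) =====
-- stated objective: simpler
-- what changed: Instead of grouping rows into a defaultdict of per-date lists and sorting each group separately, B does one global stable sort by (date, t) and a single counting pass that keeps a row while its date's count is below MAX_POSITIONS.
import Mathlib
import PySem

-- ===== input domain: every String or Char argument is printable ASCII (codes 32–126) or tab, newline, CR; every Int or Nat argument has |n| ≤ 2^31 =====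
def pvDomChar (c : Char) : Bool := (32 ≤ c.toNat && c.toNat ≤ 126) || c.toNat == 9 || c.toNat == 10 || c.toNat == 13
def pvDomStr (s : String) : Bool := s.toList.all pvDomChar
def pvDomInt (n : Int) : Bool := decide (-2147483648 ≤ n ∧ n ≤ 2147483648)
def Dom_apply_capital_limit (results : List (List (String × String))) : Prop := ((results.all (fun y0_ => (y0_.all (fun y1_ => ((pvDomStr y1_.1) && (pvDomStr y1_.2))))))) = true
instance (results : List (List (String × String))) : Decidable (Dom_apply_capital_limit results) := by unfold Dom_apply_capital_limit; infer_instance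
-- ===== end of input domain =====

-- B replaces A's group-by-date dict with per-day sorts by ONE global stable sort on (date, t)
-- followed by a single counting pass keeping the first 5 rows of each day (objective: simpler).

-- ===== PORT A =====
-- r['date'] / r['t'] (rows are dicts; under Pre_ the key is present, so the .getD "" default is never used)
def pvDate (r : List (String × String)) : String := ((PySem.Dict.mk r).get? "date").getD ""

def pvT (r : List (String × String)) : String := ((PySem.Dict.mk r).get? "t").getD ""

def apply_capital_limit (results : List (List (String × String))) : List (List (String × String)) :=
  -- daily = defaultdict(list); for r in results: daily[r['date']].append(r)
  let daily : PySem.Dict String (List (List (String × String))) :=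
    results.foldl (fun d r => d.modify (pvDate r) [] (fun l => l ++ [r])) PySem.Dict.empty
  -- for d in sorted(daily.keys()): limited.extend(sorted(daily[d], key=lambda x: x['t'])[:5])
  (PySem.List.sorted daily.keys (fun k => k) false).foldl
    (fun acc d => acc ++ (PySem.List.sorted (daily.getD d []) pvT false).take 5) []

-- ===== PORT B =====
def apply_capital_limit_alt (results : List (List (String × String))) : List (List (String × String)) :=
  -- for r in sorted(results, key=lambda x: (x['date'], x['t'])): counting pass, keep while count < 5
  ((PySem.List.sorted2 results pvDate pvT false).foldl
    (fun (st : PySem.Dict String Int × List (List (String × String))) r =>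
      let c := st.1.getD (pvDate r) 0
      if c < 5 then (st.1.insert (pvDate r) (c + 1), st.2 ++ [r]) else st)
    (PySem.Dict.empty, [])).2

-- ===== PRECONDITION & SPEC =====
-- Pre_ excludes exactly the inputs where Python A raises KeyError: a row missing key 'date' or 't'.
def Pre_apply_capital_limit (results : List (List (String × String))) : Prop :=
  ∀ r ∈ results, (PySem.Dict.mk r).contains "date" = true ∧ (PySem.Dict.mk r).contains "t" = true

instance (results : List (List (String × String))) : Decidable (Pre_apply_capital_limit results) := by
  unfold Pre_apply_capital_limit; infer_instance

def pvWitness_apply_capital_limit : (List (List (String × String))) :=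
  [[("date", "2024-01-02"), ("t", "0901")], [("date", "2024-01-02"), ("t", "0859")]]

def Spec_apply_capital_limit (results : List (List (String × String))) (out : List (List (String × String))) : Prop := out = apply_capital_limit_alt results
instance (results : List (List (String × String))) (out : List (List (String × String))) : Decidable (Spec_apply_capital_limit results out) := by unfold Spec_apply_capital_limit; infer_instance

-- ===== CLAIM (what is proved, stated in full; the proofs are below) =====
def Claim_equal_apply_capital_limit : Prop := ∀ (results : List (List (String × String))), Dom_apply_capital_limit results → Pre_apply_capital_limit results → Spec_apply_capital_limit results (apply_capital_limit results)

-- ===== LEMMAS AND PROOFS =====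

theorem pv_insertBy_prefix {α : Type} (before : α → α → Bool) (x : α) (p s : List α)
    (h : ∀ y ∈ p, before x y = false) :
    PySem.List.insertBy before x (p ++ s) = p ++ PySem.List.insertBy before x s := by
  induction p with
  | nil => rfl
  | cons y t ih =>
      simp only [List.cons_append, PySem.List.insertBy, h y (by simp)]
      simp only [Bool.false_eq_true, if_false, List.cons.injEq, true_and]
      exact ih (fun z hz => h z (by simp [hz]))

theorem pv_insertBy_suffix {α : Type} (before : α → α → Bool) (x : α) (p s : List α)
    (h : ∀ y ∈ s, before x y = true) :
    PySem.List.insertBy before x (p ++ s) = PySem.List.insertBy before x p ++ s := by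
  induction p with
  | nil =>
      cases s with
      | nil => rfl
      | cons y t => simp [PySem.List.insertBy, h y (by simp)]
  | cons y t ih =>
      by_cases hb : before x y = true
      · simp [PySem.List.insertBy, hb]
      · simp only [Bool.not_eq_true] at hb
        simp [PySem.List.insertBy, hb, ih]

theorem pv_insertBy_congr {α : Type} (b1 b2 : α → α → Bool) (x : α) (l : List α)
    (h : ∀ y ∈ l, b1 x y = b2 x y) :
    PySem.List.insertBy b1 x l = PySem.List.insertBy b2 x l := by
  induction l with
  | nil => rfl
  | cons y t ih =>
      have hy := h y (by simp)
      by_cases hb : b1 x y = true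
      · simp [PySem.List.insertBy, hb, hy ▸ hb]
      · simp only [Bool.not_eq_true] at hb
        simp [PySem.List.insertBy, hb, hy ▸ hb, ih (fun z hz => h z (by simp [hz]))]

theorem pv_sorted2_eq_foldl {α : Type} (xs : List (α)) (k1 k2 : α → String) :
    PySem.List.sorted2 xs k1 k2 false =
      xs.foldl (fun acc x => PySem.List.insertBy
        (fun a b => decide (k1 a < k1 b) || (!decide (k1 b < k1 a) && decide (k2 a < k2 b))) x acc) [] := rfl

theorem pv_strict_insertBy {κ : Type} [LinearOrder κ] (before : κ → κ → Bool)
    (hbef : ∀ a b, before a b = true ↔ a < b) (d : κ) (ds : List κ)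
    (hp : ds.Pairwise (· < ·)) (hd : d ∉ ds) :
    ∃ p s, ds = p ++ s ∧
      PySem.List.insertBy before d ds = p ++ d :: s ∧
      (∀ y ∈ p, y < d) ∧ (∀ y ∈ s, d < y) := by
  induction ds with
  | nil => exact ⟨[], [], rfl, rfl, by simp, by simp⟩
  | cons y t ih =>
      by_cases hb : before d y = true
      · have hdy : d < y := (hbef d y).mp hb
        refine ⟨[], y :: t, rfl, ?_, by simp, ?_⟩
        · simp [PySem.List.insertBy, hb]
        · intro z hz
          rcases List.mem_cons.mp hz with rfl | hz
          · exact hdy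
          · exact lt_trans hdy ((List.pairwise_cons.mp hp).1 z hz)
      · obtain ⟨p, s, h1, h2, h3, h4⟩ := ih (List.pairwise_cons.mp hp).2
          (fun hmem => hd (List.mem_cons.mpr (Or.inr hmem)))
        simp only [Bool.not_eq_true] at hb
        have hyd : y < d := by
          rcases lt_trichotomy y d with h | h | h
          · exact h
          · exact absurd (h ▸ List.mem_cons_self) hd
          · exact absurd ((hbef d y).mpr h) (by simp [hb])
        refine ⟨y :: p, s, by simp [h1], ?_, ?_, h4⟩
        · simp [PySem.List.insertBy, hb, h2]
        · intro z hz
          rcases List.mem_cons.mp hz with rfl | hz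
          · exact hyd
          · exact h3 z hz

theorem pv_sorted2_decomp {α : Type} (k1 k2 : α → String) (xs : List α) :
    PySem.List.sorted2 xs k1 k2 false =
      (PySem.List.sorted (PySem.Set.ofList (xs.map k1)) (fun d => d) false).flatMap
        (fun d => PySem.List.sorted (xs.filter (fun r => k1 r == d)) k2 false) := by
  induction xs using List.reverseRecOn with
  | nil => rfl
  | append_singleton xs x ih =>
      have hkey : ∀ (d' : String) (y : α),
          y ∈ PySem.List.sorted (xs.filter (fun r => k1 r == d')) k2 false → k1 y = d' := by
        intro d' y hy
        have := (PySem.List.mem_sorted _ _ _ _).mp hy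
        exact beq_iff_eq.mp (List.mem_filter.mp this).2
      rw [pv_sorted2_eq_foldl, List.foldl_append, List.foldl_cons, List.foldl_nil,
        ← pv_sorted2_eq_foldl, ih]
      have hgroup_ne : ∀ d' : String, d' ≠ k1 x →
          (xs ++ [x]).filter (fun r => k1 r == d') = xs.filter (fun r => k1 r == d') := by
        intro d' hne
        have hb : (k1 x == d') = false := beq_eq_false_iff_ne.mpr (fun h => hne h.symm)
        rw [List.filter_append]
        simp [hb]
      have hgroup_d : (xs ++ [x]).filter (fun r => k1 r == k1 x)
          = xs.filter (fun r => k1 r == k1 x) ++ [x] := by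
        rw [List.filter_append]; simp
      have hset : PySem.Set.ofList ((xs ++ [x]).map k1) =
          PySem.Set.add (PySem.Set.ofList (xs.map k1)) (k1 x) := by
        rw [List.map_append, PySem.Set.ofList_eq_foldl, List.foldl_append,
          show List.map k1 [x] = [k1 x] from rfl, List.foldl_cons,
          List.foldl_nil, ← PySem.Set.ofList_eq_foldl]
      have hpair : (PySem.List.sorted (PySem.Set.ofList (xs.map k1)) (fun y => y) false).Pairwise (· < ·) :=
        PySem.List.sorted_ofList_pairwise_lt (xs.map k1)
      by_cases hc : k1 x ∈ PySem.Set.ofList (xs.map k1)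
      · have hadd : PySem.Set.add (PySem.Set.ofList (xs.map k1)) (k1 x) = PySem.Set.ofList (xs.map k1) := by
          have hcon : (PySem.Set.ofList (List.map k1 xs)).contains (k1 x) = true := by
            simp only [PySem.Set.contains, List.contains_iff_mem]; exact hc
          simp only [PySem.Set.add, hcon, if_true]
        rw [hset, hadd]
        have hmem : k1 x ∈ PySem.List.sorted (PySem.Set.ofList (xs.map k1)) (fun y => y) false :=
          (PySem.List.mem_sorted _ _ _ _).mpr hc
        obtain ⟨p, s, hds⟩ := List.append_of_mem hmem
        rw [hds] at hpair ⊢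
        obtain ⟨_, hpair2, hps⟩ := List.pairwise_append.mp hpair
        have hpd : ∀ y ∈ p, y < k1 x := fun y hy => hps y hy (k1 x) (by simp)
        have hsd : ∀ y ∈ s, k1 x < y := fun y hy => (List.pairwise_cons.mp hpair2).1 y hy
        rw [List.flatMap_append, List.flatMap_cons, List.flatMap_append, List.flatMap_cons]
        rw [pv_insertBy_prefix _ x _ _ (by
          intro y hy
          obtain ⟨d', hd', hyg⟩ := List.mem_flatMap.mp hy
          have hk := hkey d' y hyg
          have hlt : d' < k1 x := hpd d' hd'
          simp only [Bool.or_eq_false_iff, Bool.and_eq_false_iff, decide_eq_false_iff_not, hk]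
          exact ⟨not_lt_of_gt hlt, Or.inl (by simp [hlt])⟩)]
        rw [pv_insertBy_suffix _ x _ _ (by
          intro y hy
          obtain ⟨d', hd', hyg⟩ := List.mem_flatMap.mp hy
          have hk := hkey d' y hyg
          have hlt : k1 x < d' := hsd d' hd'
          simp [hk, hlt])]
        rw [pv_insertBy_congr _ (fun a b => decide (k2 a < k2 b)) x _ (by
          intro y hy
          have hk := hkey (k1 x) y hy
          simp [hk])]
        rw [List.flatMap_congr (l := p)
          (f := fun d' => PySem.List.sorted ((xs ++ [x]).filter (fun r => k1 r == d')) k2 false)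
          (g := fun d' => PySem.List.sorted (xs.filter (fun r => k1 r == d')) k2 false)
          (fun d' hd' => by simp only [hgroup_ne d' (ne_of_lt (hpd d' hd'))]),
          List.flatMap_congr (l := s)
          (f := fun d' => PySem.List.sorted ((xs ++ [x]).filter (fun r => k1 r == d')) k2 false)
          (g := fun d' => PySem.List.sorted (xs.filter (fun r => k1 r == d')) k2 false)
          (fun d' hd' => by simp only [hgroup_ne d' (ne_of_gt (hsd d' hd'))])]
        rw [hgroup_d, PySem.List.sorted_eq_foldl_insertBy (xs.filter (fun r => k1 r == k1 x) ++ [x]) k2,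
          List.foldl_append, List.foldl_cons, List.foldl_nil, ← PySem.List.sorted_eq_foldl_insertBy]
      · have hadd : PySem.Set.add (PySem.Set.ofList (xs.map k1)) (k1 x)
            = PySem.Set.ofList (xs.map k1) ++ [k1 x] := by
          have hcon : (PySem.Set.ofList (List.map k1 xs)).contains (k1 x) = false := by
            simp only [PySem.Set.contains]
            rw [← Bool.not_eq_true]
            simp only [List.contains_iff_mem]
            exact hc
          simp only [PySem.Set.add, hcon]
          simp
        rw [hset, hadd]
        have hnomem : k1 x ∉ PySem.List.sorted (PySem.Set.ofList (xs.map k1)) (fun y => y) false := by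
          rw [PySem.List.mem_sorted]; exact hc
        obtain ⟨p, s, hsplit, hins, hpd, hsd⟩ := pv_strict_insertBy
          (fun a b : String => decide ((fun y => y) a < (fun y => y) b)) (by intro a b; simp)
          (k1 x) _ hpair hnomem
        have hsorted_new : PySem.List.sorted (PySem.Set.ofList (xs.map k1) ++ [k1 x]) (fun y => y) false =
            p ++ k1 x :: s := by
          rw [PySem.List.sorted_eq_foldl_insertBy, List.foldl_append, List.foldl_cons, List.foldl_nil,
            ← PySem.List.sorted_eq_foldl_insertBy]
          exact hins
        rw [hsorted_new, hsplit]
        have hgd_nil : xs.filter (fun r => k1 r == k1 x) = [] := by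
          rw [List.filter_eq_nil_iff]
          intro r hr hrb
          exact hc ((PySem.Set.mem_ofList _ _).mpr (List.mem_map.mpr ⟨r, hr, beq_iff_eq.mp hrb⟩))
        have hgd' : PySem.List.sorted ((xs ++ [x]).filter (fun r => k1 r == k1 x)) k2 false = [x] := by
          rw [hgroup_d, hgd_nil]; rfl
        rw [List.flatMap_append]
        rw [pv_insertBy_prefix _ x _ _ (by
          intro y hy
          obtain ⟨d', hd', hyg⟩ := List.mem_flatMap.mp hy
          have hk := hkey d' y hyg
          have hlt : d' < k1 x := hpd d' hd'
          simp only [Bool.or_eq_false_iff, Bool.and_eq_false_iff, decide_eq_false_iff_not, hk]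
          exact ⟨not_lt_of_gt hlt, Or.inl (by simp [hlt])⟩)]
        have hsuf : PySem.List.insertBy
            (fun a b => decide (k1 a < k1 b) || (!decide (k1 b < k1 a) && decide (k2 a < k2 b))) x
            (s.flatMap (fun d' => PySem.List.sorted (xs.filter (fun r => k1 r == d')) k2 false)) =
            x :: s.flatMap (fun d' => PySem.List.sorted (xs.filter (fun r => k1 r == d')) k2 false) := by
          have h2 := pv_insertBy_suffix
            (fun a b => decide (k1 a < k1 b) || (!decide (k1 b < k1 a) && decide (k2 a < k2 b))) x []
            (s.flatMap (fun d' => PySem.List.sorted (xs.filter (fun r => k1 r == d')) k2 false)) (by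
              intro y hy
              obtain ⟨d', hd', hyg⟩ := List.mem_flatMap.mp hy
              have hk := hkey d' y hyg
              have hlt : k1 x < d' := hsd d' hd'
              simp [hk, hlt])
          simpa using h2
        rw [hsuf]
        rw [List.flatMap_append, List.flatMap_cons]
        rw [List.flatMap_congr (l := p)
          (f := fun d' => PySem.List.sorted ((xs ++ [x]).filter (fun r => k1 r == d')) k2 false)
          (g := fun d' => PySem.List.sorted (xs.filter (fun r => k1 r == d')) k2 false)
          (fun d' hd' => by simp only [hgroup_ne d' (ne_of_lt (hpd d' hd'))]),
          List.flatMap_congr (l := s)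
          (f := fun d' => PySem.List.sorted ((xs ++ [x]).filter (fun r => k1 r == d')) k2 false)
          (g := fun d' => PySem.List.sorted (xs.filter (fun r => k1 r == d')) k2 false)
          (fun d' hd' => by simp only [hgroup_ne d' (ne_of_gt (hsd d' hd'))])]
        rw [hgd']
        simp

-- the counting loop of port B
def pvLoopF (f1 : List (String × String) → String) :
    (PySem.Dict String Int × List (List (String × String))) → List (String × String) →
    (PySem.Dict String Int × List (List (String × String))) :=
  fun st r =>
    let c := st.1.getD (f1 r) 0
    if c < 5 then (st.1.insert (f1 r) (c + 1), st.2 ++ [r]) else st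

-- one same-date block through the counting loop appends the first (5 - n) rows
theorem pv_loop_block (f1 : List (String × String) → String) (g : List (List (String × String)))
    (d : String) (hg : ∀ r ∈ g, f1 r = d) (dct : PySem.Dict String Int)
    (acc : List (List (String × String))) (n : Int) (hn : dct.getD d 0 = n) (h0 : 0 ≤ n) :
    (g.foldl (pvLoopF f1) (dct, acc)).2 = acc ++ g.take (5 - n).toNat ∧
    ∀ k, k ≠ d → (g.foldl (pvLoopF f1) (dct, acc)).1.getD k 0 = dct.getD k 0 := by
  induction g generalizing dct acc n with
  | nil => simp
  | cons r t ih =>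
      have hrd : f1 r = d := hg r (by simp)
      by_cases hlt : n < 5
      · have hstep : pvLoopF f1 (dct, acc) r = (dct.insert d (n + 1), acc ++ [r]) := by
          simp [pvLoopF, hrd, hn, hlt]
        have ih' := ih (fun z hz => hg z (by simp [hz])) (dct.insert d (n + 1)) (acc ++ [r])
          (n + 1) (PySem.Dict.getD_insert_self dct d (n+1) 0) (by omega)
        refine ⟨?_, ?_⟩
        · rw [List.foldl_cons, hstep, ih'.1]
          have htn : (5 - n).toNat = (5 - (n + 1)).toNat + 1 := by omega
          rw [htn, List.take_succ_cons, List.append_assoc]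
          rfl
        · intro k hk
          rw [List.foldl_cons, hstep, ih'.2 k hk, PySem.Dict.getD_insert_of_ne dct _ _ hk]
      · have hstep : pvLoopF f1 (dct, acc) r = (dct, acc) := by
          simp [pvLoopF, hrd, hn, hlt]
        have ih' := ih (fun z hz => hg z (by simp [hz])) dct acc n hn h0
        refine ⟨?_, fun k hk => by rw [List.foldl_cons, hstep, ih'.2 k hk]⟩
        rw [List.foldl_cons, hstep, ih'.1]
        have h5 : (5 - n).toNat = 0 := by omega
        simp [h5]

-- blocks with pairwise-distinct dates through the counting loop: take 5 from each block
theorem pv_loop_blocks (f1 : List (String × String) → String)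
    (g : String → List (List (String × String))) (ds : List String) (hnd : ds.Nodup)
    (hg : ∀ d ∈ ds, ∀ r ∈ g d, f1 r = d) (dct : PySem.Dict String Int)
    (acc : List (List (String × String))) (h0 : ∀ d ∈ ds, dct.getD d 0 = 0) :
    ((ds.flatMap g).foldl (pvLoopF f1) (dct, acc)).2 =
      acc ++ ds.flatMap (fun d => (g d).take 5) := by
  induction ds generalizing dct acc with
  | nil => simp
  | cons d t ih =>
      rw [List.flatMap_cons, List.foldl_append]
      have hb := pv_loop_block f1 (g d) d (hg d (by simp)) dct acc 0 (h0 d (by simp)) (by omega)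
      have hrest := ih (List.nodup_cons.mp hnd).2 (fun d' hd' => hg d' (by simp [hd']))
        ((g d).foldl (pvLoopF f1) (dct, acc)).1 ((g d).foldl (pvLoopF f1) (dct, acc)).2
        (fun d' hd' => by
          rw [hb.2 d' (fun h => (List.nodup_cons.mp hnd).1 (h ▸ hd'))]
          exact h0 d' (by simp [hd']))
      rw [show ((g d).foldl (pvLoopF f1) (dct, acc)) =
        (((g d).foldl (pvLoopF f1) (dct, acc)).1, ((g d).foldl (pvLoopF f1) (dct, acc)).2) from rfl,
        hrest, hb.1]
      simp

-- port A in flatMap form: sorted distinct dates, each day's group t-sorted and truncated to 5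
theorem pv_A_flatMap (results : List (List (String × String))) :
    apply_capital_limit results =
      (PySem.List.sorted (PySem.Set.ofList (results.map pvDate)) (fun d => d) false).flatMap
        (fun d => (PySem.List.sorted (results.filter (fun r => pvDate r == d)) pvT false).take 5) := by
  have hkeys : (results.foldl (fun d r => d.modify (pvDate r) [] (fun l => l ++ [r]))
      PySem.Dict.empty).keys = PySem.Set.ofList (results.map pvDate) :=
    PySem.Dict.keys_foldl_modify_key results pvDate [] (fun _ r => fun l => l ++ [r]) PySem.Dict.empty
  have hgetD : ∀ c, (results.foldl (fun d r => d.modify (pvDate r) [] (fun l => l ++ [r]))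
      PySem.Dict.empty).getD c [] = results.filter (fun r => pvDate r == c) := by
    intro c
    have hfold : results.foldl (fun d r => d.modify (pvDate r) [] (fun l => l ++ [r]))
        PySem.Dict.empty
        = (results.map (fun r => (pvDate r, r))).foldl
            (fun d p => d.modify p.1 [] (fun l => l ++ [p.2])) PySem.Dict.empty := by
      rw [List.foldl_map]
    rw [hfold, PySem.Dict.getD_foldl_modify_append, List.filter_map]
    simp [Function.comp_def, List.map_map]
  show (PySem.List.sorted (results.foldl (fun d r => d.modify (pvDate r) [] (fun l => l ++ [r]))
      PySem.Dict.empty).keys (fun k => k) false).foldl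
    (fun acc d => acc ++ (PySem.List.sorted ((results.foldl
      (fun d r => d.modify (pvDate r) [] (fun l => l ++ [r])) PySem.Dict.empty).getD d [])
      pvT false).take 5) [] = _
  rw [hkeys, PySem.List.foldl_append_eq_flatMap, List.nil_append]
  exact List.flatMap_congr (fun d _ => by rw [hgetD d])

-- port B in flatMap form, via the sort decomposition and the counting-loop lemmas
theorem pv_B_flatMap (results : List (List (String × String))) :
    apply_capital_limit_alt results =
      (PySem.List.sorted (PySem.Set.ofList (results.map pvDate)) (fun d => d) false).flatMap
        (fun d => (PySem.List.sorted (results.filter (fun r => pvDate r == d)) pvT false).take 5) := by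
  show ((PySem.List.sorted2 results pvDate pvT false).foldl (pvLoopF pvDate)
      (PySem.Dict.empty, [])).2 = _
  rw [pv_sorted2_decomp pvDate pvT results]
  have hpair := PySem.List.sorted_ofList_pairwise_lt (results.map pvDate)
  rw [pv_loop_blocks pvDate _ _ (hpair.imp ne_of_lt)
    (fun d _ y hy => beq_iff_eq.mp (List.mem_filter.mp ((PySem.List.mem_sorted _ _ _ _).mp hy)).2)
    PySem.Dict.empty [] (fun d _ => PySem.Dict.getD_empty d 0)]
  rw [List.nil_append]

-- ===== VERDICT (by name: the statement is the Claim_ definition above) =====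
theorem apply_capital_limit_spec : Claim_equal_apply_capital_limit := by
  intro results _ _
  unfold Spec_apply_capital_limit
  rw [pv_A_flatMap, pv_B_flatMap]
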